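-- pv_equiv track=rewrite | github.com/hyo-jae-jung/programmers | level1/가장_가까운_같은_글자.py | solution
-- ===== SOURCE A (Python) =====
-- from collections import deque
--
-- def solution(s):
--     s = deque(reversed(s))
--     answer = deque()
--     while s:
--         temp = s.popleft()
--         if temp in s:
--             answer.appendleft(s.index(temp)+1)
--         else:
--             answer.appendleft(-1)
--     return list(answer)
-- ===== SOURCE B (Python) =====
-- def solution(s):
--     last = {}
--     answer = []
--     for i, c in enumerate(s):
--         answer.append(i - last[c] if c in last else -1)
--         last[c] = i
--     return answer
-- ===== Notes on version B (the rewrite author's own statement) =====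
-- stated objective: faster
-- what changed: Replaces the reversed-deque loop with its per-element membership test and linear index scan by a single forward pass that keeps a dict of each character's last-seen index, turning O(n^2) into O(n).
import Mathlib
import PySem

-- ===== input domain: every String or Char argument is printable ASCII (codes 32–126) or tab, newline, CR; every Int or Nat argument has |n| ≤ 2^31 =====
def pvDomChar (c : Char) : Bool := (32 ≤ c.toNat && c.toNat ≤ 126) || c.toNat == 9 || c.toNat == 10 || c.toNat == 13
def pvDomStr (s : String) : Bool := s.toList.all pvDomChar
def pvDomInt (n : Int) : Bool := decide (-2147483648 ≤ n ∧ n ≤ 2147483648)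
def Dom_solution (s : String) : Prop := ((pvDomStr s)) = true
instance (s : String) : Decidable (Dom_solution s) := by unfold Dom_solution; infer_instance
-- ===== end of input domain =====

-- B replaces A's reversed-deque loop (membership test + linear index scan per element)
-- by a single forward pass with a dict of last-seen indices: asymptotically faster.

-- ===== PORT A =====
-- A's while-loop over the reversed deque: pop the front, scan the remainder
-- for the same character, prepend distance+... to the answer deque.
def solutionLoopA : List Char → List Int → List Int
  | [], answer => answer
  | temp :: rest, answer =>
    solutionLoopA rest
      ((if rest.contains temp then
          (((PySem.List.index? rest temp).getD 0 : Nat) : Int) + 1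
        else -1) :: answer)

def solution (s : String) : List Int := solutionLoopA s.toList.reverse []

-- ===== PORT B =====
-- B's forward pass: enumerate(s) with a dict `last` of last-seen index per char.
def solutionLoopB : List Char → Nat → PySem.Dict Char Int → List Int
  | [], _, _ => []
  | c :: rest, i, last =>
    (match PySem.Dict.get? last c with
     | some j => (i : Int) - j
     | none => -1) :: solutionLoopB rest (i + 1) (PySem.Dict.insert last c (i : Int))

def solution_alt (s : String) : List Int := solutionLoopB s.toList 0 PySem.Dict.empty

-- ===== PRECONDITION & SPEC =====
def Spec_solution (s : String) (out : List Int) : Prop := out = solution_alt s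
instance (s : String) (out : List Int) : Decidable (Spec_solution s out) := by unfold Spec_solution; infer_instance

-- ===== CLAIM (what is proved, stated in full; the proofs are below) =====
def Claim_equal_solution : Prop := ∀ (s : String), Dom_solution s → Spec_solution s (solution s)

-- ===== LEMMAS AND PROOFS =====

-- index (from the left) of the LAST occurrence of t in l
def lastPre : List Char → Char → Option Nat
  | [], _ => none
  | c :: rest, t =>
    match lastPre rest t with
    | some k => some (k + 1)
    | none => if c == t then some 0 else none

-- the dict state after B has processed l starting at index i
def dictAfter : List Char → Nat → PySem.Dict Char Int → PySem.Dict Char Int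
  | [], _, d => d
  | c :: rest, i, d => dictAfter rest (i + 1) (PySem.Dict.insert d c (i : Int))

lemma loopA_acc (l : List Char) : ∀ acc, solutionLoopA l acc = solutionLoopA l [] ++ acc := by
  induction l with
  | nil => intro acc; simp [solutionLoopA]
  | cons t rest ih =>
      intro acc
      simp only [solutionLoopA]
      rw [ih, ih [_]]
      simp

lemma dictAfter_snoc (t : Char) (l : List Char) : ∀ i d,
    dictAfter (l ++ [t]) i d = PySem.Dict.insert (dictAfter l i d) t ((i + l.length : Nat) : Int) := by
  induction l with
  | nil => intro i d; simp [dictAfter]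
  | cons c rest ih =>
      intro i d
      simp only [List.cons_append, dictAfter, ih, List.length_cons]
      have hn : i + (rest.length + 1) = i + 1 + rest.length := by omega
      rw [hn]

lemma loopB_snoc (t : Char) (l : List Char) : ∀ i d,
    solutionLoopB (l ++ [t]) i d =
      solutionLoopB l i d ++
        [(match PySem.Dict.get? (dictAfter l i d) t with
          | some j => ((i + l.length : Nat) : Int) - j
          | none => -1)] := by
  induction l with
  | nil => intro i d; simp [solutionLoopB, dictAfter]
  | cons c rest ih =>
      intro i d
      simp only [List.cons_append, solutionLoopB, dictAfter, ih, List.length_cons]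
      have hn : i + (rest.length + 1) = i + 1 + rest.length := by omega
      rw [hn]

lemma lastPre_snoc (l : List Char) (t c : Char) :
    lastPre (l ++ [t]) c = if c = t then some l.length else lastPre l c := by
  induction l with
  | nil =>
      simp only [List.nil_append, lastPre, List.length_nil]
      by_cases h : c = t
      · simp [h]
      · simp [beq_iff_eq, h, Ne.symm h]
  | cons x rest ih =>
      simp only [List.cons_append, lastPre, ih, List.length_cons]
      by_cases h : c = t
      · simp [h]
      · simp [h]

lemma lastPre_lt (l : List Char) (c : Char) : ∀ j, lastPre l c = some j → j < l.length := by
  induction l with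
  | nil => intro j h; simp [lastPre] at h
  | cons x rest ih =>
      intro j h
      simp only [lastPre] at h
      cases hr : lastPre rest c with
      | some k =>
          rw [hr] at h
          simp only [Option.some.injEq] at h
          have := ih k hr
          simp only [List.length_cons]
          omega
      | none =>
          rw [hr] at h
          by_cases hx : x == c
          · simp only [hx, if_true, Option.some.injEq] at h
            simp only [List.length_cons]
            omega
          · simp [hx] at h

lemma index?_reverse_eq (l : List Char) (c : Char) :
    PySem.List.index? l.reverse c = (lastPre l c).map (fun j => l.length - 1 - j) := by
  induction l using List.reverseRecOn with
  | nil => simp [lastPre, PySem.List.index?_eq_idxOf?, List.idxOf?]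
  | append_singleton l t ih =>
      rw [List.reverse_append, lastPre_snoc]
      simp only [List.reverse_cons, List.reverse_nil, List.nil_append, List.singleton_append]
      by_cases h : c = t
      · subst h
        rw [PySem.List.index?_cons_self]
        simp
      · rw [PySem.List.index?_cons_of_ne _ (Ne.symm h), ih]
        simp only [if_neg h]
        cases hl : lastPre l c with
        | none => simp
        | some j =>
            have hj := lastPre_lt l c j hl
            simp only [Option.map_some]
            congr 1
            simp [List.length_append]
            omega

lemma get?_dictAfter (l : List Char) (c : Char) : ∀ i d,
    PySem.Dict.get? (dictAfter l i d) c =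
      (match lastPre l c with
       | some j => some ((i + j : Nat) : Int)
       | none => PySem.Dict.get? d c) := by
  induction l using List.reverseRecOn with
  | nil => intro i d; simp [dictAfter, lastPre]
  | append_singleton l t ih =>
      intro i d
      rw [dictAfter_snoc, lastPre_snoc]
      by_cases h : c = t
      · subst h
        simp [PySem.Dict.get?_insert_self]
      · rw [PySem.Dict.get?_insert_of_ne _ _ h, ih]
        simp [if_neg h]

-- the popped-element value A computes equals the value B computes at the same position
lemma value_bridge (l : List Char) (t : Char) :
    (if (l.reverse).contains t then
        (((PySem.List.index? l.reverse t).getD 0 : Nat) : Int) + 1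
     else -1) =
    (match PySem.Dict.get? (dictAfter l 0 PySem.Dict.empty) t with
     | some j => ((0 + l.length : Nat) : Int) - j
     | none => -1) := by
  rw [get?_dictAfter, index?_reverse_eq]
  cases hl : lastPre l t with
  | none =>
      have : t ∉ l.reverse := by
        rw [← PySem.List.index?_eq_none_iff, index?_reverse_eq, hl]; rfl
      simp [List.contains_eq_mem, this, PySem.Dict.get?_empty]
  | some j =>
      have hj := lastPre_lt l t j hl
      have hmem : t ∈ l.reverse := by
        rw [← PySem.List.index?_isSome_iff, index?_reverse_eq, hl]; rfl
      simp only [List.contains_eq_mem, hmem, decide_true, if_true]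
      simp only [Option.map_some, Option.getD_some]
      show ((l.length - 1 - j : Nat) : Int) + 1 = ((0 + l.length : Nat) : Int) - ((0 + j : Nat) : Int)
      omega

lemma main_loop (l : List Char) :
    solutionLoopA l.reverse [] = solutionLoopB l 0 PySem.Dict.empty := by
  induction l using List.reverseRecOn with
  | nil => rfl
  | append_singleton l t ih =>
      rw [List.reverse_append]
      simp only [List.reverse_cons, List.reverse_nil, List.nil_append, List.singleton_append,
        solutionLoopA]
      rw [loopA_acc, ih, loopB_snoc, value_bridge]

-- ===== VERDICT (by name: the statement is the Claim_ definition above) =====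
theorem solution_spec : Claim_equal_solution := by
  intro s _
  unfold Spec_solution solution solution_alt
  exact main_loop s.toList
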